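-- pv_equiv track=rewrite | github.com/tjdud0123/daily_algorithm | 월간코드챌린지1/4.배열 경우의 수.py | solution
-- ===== SOURCE A (Python) =====
-- from itertools import product
--
-- def solution(a):
--     result = 0
--     ROW, COL = len(a), len(a[0])
--     col_nums = list(map(sum, zip(*a)))  # [2, 4, 2]
--     cands = list(product(*[(1, 0) for _ in range(ROW)]))
--     col_cands = [[] for _ in col_nums]
--     for i, total in enumerate(col_nums):
--         for cand in cands:
--             if total == sum(cand):
--                 col_cands[i].append(cand)
--     temp_cands = list(product(*[cand for cand in col_cands]))
--     array_cands = list(map(lambda x: list(zip(*x)), temp_cands))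
--     for array in array_cands:
--         for row in array:
--             if row.count(1) % 2 != 0:
--                 break
--         else:
--             result = (result+1) % (pow(10, 7) + 19)
--
--     return result
-- ===== SOURCE B (Python) =====
-- def _states(n):
--     if n == 0:
--         return [()]
--     rest = _states(n - 1)
--     return [(0,) + s for s in rest] + [(1,) + s for s in rest]
--
--
-- def _vxor(p, c):
--     return tuple((x + y) % 2 for x, y in zip(p, c))
--
--
-- def solution(a):
--     MOD = 10 ** 7 + 19
--     n = len(a)
--     m = min(len(r) for r in a)
--     ts = [sum(r[j] for r in a) for j in range(m)]
--     states = _states(n)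
--     groups = {}
--     for c in states:
--         groups.setdefault(sum(c), []).append(c)
--     zero = (0,) * n
--     dp = {s: 1 if s == zero else 0 for s in states}
--     for t in ts:
--         cc = groups.get(t, [])
--         if not cc:
--             return 0
--         dp = {s: sum(dp[_vxor(s, c)] for c in cc) % MOD for s in states}
--     return dp[zero]
-- ===== Notes on version B (the rewrite author's own statement) =====
-- stated objective: faster
-- what changed: A materialises every candidate matrix (the cartesian product of the per-column candidate lists) and tests each matrix's rows for even parity; B never builds matrices: it runs a column-by-column dynamic programme over row-parity vectors, keeping per parity vector the count (mod 10^7+19) of column choices so far.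
-- outside the precondition, e.g. on solution([]): A raises IndexError, B raises ValueError
import Mathlib
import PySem

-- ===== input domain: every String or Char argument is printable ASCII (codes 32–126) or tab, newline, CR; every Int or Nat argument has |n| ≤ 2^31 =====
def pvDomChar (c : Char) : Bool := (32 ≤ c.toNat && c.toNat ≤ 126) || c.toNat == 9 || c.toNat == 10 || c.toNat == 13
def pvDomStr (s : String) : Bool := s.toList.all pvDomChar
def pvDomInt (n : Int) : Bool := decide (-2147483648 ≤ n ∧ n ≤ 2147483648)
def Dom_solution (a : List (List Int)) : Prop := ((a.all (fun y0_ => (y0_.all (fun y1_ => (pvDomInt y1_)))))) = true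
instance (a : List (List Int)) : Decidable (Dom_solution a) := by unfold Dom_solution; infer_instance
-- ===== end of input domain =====

-- B replaces A's enumeration of every candidate matrix by a column-by-column DP over
-- row-parity vectors (objective: faster; a timing run measures the speed-up).


-- ===== PORT A =====
-- len of the shortest row (what zip(*rows) truncates to)
def minLen (rows : List (List Int)) : Nat :=
  match rows with
  | [] => 0
  | r :: rs => rs.foldl (fun acc s => min acc s.length) r.length

-- list(zip(*rows)); exact: each index j is < the length of every row, so getD's default is never used
def zipT (rows : List (List Int)) : List (List Int) :=
  (List.range (minLen rows)).map (fun j => rows.map (fun r => r.getD j 0))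

-- list(product(*[(1, 0) for _ in range(n)]))
def prodBits : Nat → List (List Int)
  | 0 => [[]]
  | n + 1 => ([1, 0] : List Int).flatMap (fun x => (prodBits n).map (fun s => x :: s))

-- list(product(*col_cands))
def prodLists : List (List (List Int)) → List (List (List Int))
  | [] => [[]]
  | l :: ls => l.flatMap (fun x => (prodLists ls).map (fun tup => x :: tup))

def solution (a : List (List Int)) : Int :=
  let colNums := (zipT a).map List.sum
  let cands := prodBits a.length
  let colCands := colNums.map (fun total => cands.filter (fun c => total == c.sum))
  let arrayCands := (prodLists colCands).map (fun x => zipT x)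
  -- for/else: result advances exactly when no row breaks, i.e. every row has an even count of 1s
  arrayCands.foldl
    (fun result array =>
      if array.all (fun row => PySem.List.count row 1 % 2 == 0) then
        PySem.Int.mod (result + 1) (10 ^ 7 + 19)
      else result)
    0

-- ===== PORT B =====
-- _states(n)
def statesL : Nat → List (List Int)
  | 0 => [[]]
  | n + 1 => (statesL n).map (fun s => 0 :: s) ++ (statesL n).map (fun s => 1 :: s)

-- _vxor(p, c)
def vxor (p c : List Int) : List Int :=
  (p.zip c).map (fun xy => PySem.Int.mod (xy.1 + xy.2) 2)

-- the `for t in ts: ... return 0 ... / return dp[zero]` loop (early return becomes recursion)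
def altLoop (states : List (List Int)) (groups : PySem.Dict Int (List (List Int)))
    (ts : List Int) (dp : PySem.Dict (List Int) Int) (zero : List Int) : Int :=
  match ts with
  | [] => dp.getD zero 0   -- dp[zero]; exact: zero is a key of dp
  | t :: rest =>
    let cc := groups.get? t |>.getD []   -- groups.get(t, [])
    if cc.isEmpty then 0
    else
      altLoop states groups rest
        (states.foldl
          (fun d s => d.insert s (PySem.Int.mod
            ((cc.map (fun c => dp.getD (vxor s c) 0)).sum) (10 ^ 7 + 19)))
          PySem.Dict.empty) zero

def solution_alt (a : List (List Int)) : Int :=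
  let n := a.length
  let m := minLen a            -- min(len(r) for r in a); raises on [] in Python — outside Pre_
  let ts := (List.range m).map (fun j => (a.map (fun r => r.getD j 0)).sum)
      -- exact: j < m ≤ len(r) for every row r
  let states := statesL n
  let groups := states.foldl (fun d c => d.modify c.sum [] (fun l => l ++ [c]))
      (PySem.Dict.empty (κ := Int) (ν := List (List Int)))
      -- groups.setdefault(sum(c), []).append(c)
  let zero : List Int := List.replicate n 0
  let dp0 := states.foldl (fun d s => d.insert s (if s == zero then (1 : Int) else 0))
      (PySem.Dict.empty (κ := List Int) (ν := Int))
      -- {s: 1 if s == zero else 0 for s in states}; dp lookups in the loop always hit a key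
  altLoop states groups ts dp0 zero

-- ===== PRECONDITION & SPEC =====
-- Pre_ excludes only a = [], where both Pythons raise (A an IndexError on a[0], B a ValueError on min()).
def Pre_solution (a : List (List Int)) : Prop := a ≠ []
instance (a : List (List Int)) : Decidable (Pre_solution a) := by unfold Pre_solution; infer_instance
def pvWitness_solution : List (List Int) := [[1, 0], [1, 0]]

def Spec_solution (a : List (List Int)) (out : Int) : Prop := out = solution_alt a
instance (a : List (List Int)) (out : Int) : Decidable (Spec_solution a out) := by unfold Spec_solution; infer_instance

-- ===== CLAIM (what is proved, stated in full; the proofs are below) =====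
def Claim_equal_solution : Prop := ∀ (a : List (List Int)), Dom_solution a → Pre_solution a → Spec_solution a (solution a)

-- ===== LEMMAS AND PROOFS =====

-- 0/1 vectors of length n
def Bin (n : Nat) (p : List Int) : Prop := p.length = n ∧ ∀ x ∈ p, x = 0 ∨ x = 1

-- componentwise parity (mod-2 sum) of a tuple of columns
def parv (n : Nat) (tup : List (List Int)) : List Int := tup.foldr vxor (List.replicate n 0)

-- number of column tuples drawn from CC whose row-parity vector is p
def Acnt (n : Nat) (CC : List (List (List Int))) (p : List Int) : Int :=
  (((prodLists CC).countP (fun tup => parv n tup == p) : Nat) : Int)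

theorem length_vxor (p q : List Int) : (vxor p q).length = min p.length q.length := by
  simp [vxor]

theorem getElem?_vxor (p q : List Int) (j : Nat) (h1 : j < p.length) (h2 : j < q.length) :
    (vxor p q)[j]? = some ((p[j] + q[j]) % 2) := by
  simp [vxor, h1, h2]

theorem getElem?_vxor_none (p q : List Int) (j : Nat) (h : ¬(j < p.length ∧ j < q.length)) :
    (vxor p q)[j]? = none := by
  rw [List.getElem?_eq_none]
  simp only [length_vxor]
  omega

theorem getElem_vxor (p q : List Int) (j : Nat) (h1 : j < p.length) (h2 : j < q.length)
    (h3 : j < (vxor p q).length) : (vxor p q)[j] = (p[j] + q[j]) % 2 := by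
  have h := getElem?_vxor p q j h1 h2
  rw [List.getElem?_eq_getElem h3] at h
  exact Option.some.inj h

theorem Bin_vxor {n : Nat} {p q : List Int} (hp : Bin n p) (hq : Bin n q) : Bin n (vxor p q) := by
  refine ⟨by simp [length_vxor, hp.1, hq.1], ?_⟩
  intro x hx
  simp only [vxor, List.mem_map] at hx
  obtain ⟨⟨y, z⟩, hmem, rfl⟩ := hx
  rw [PySem.Int.mod_eq_emod_of_pos (by norm_num : (0:Int) < 2)]
  omega

theorem mem_statesL {n : Nat} {p : List Int} : p ∈ statesL n ↔ Bin n p := by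
  induction n generalizing p with
  | zero =>
    simp only [statesL, List.mem_singleton]
    constructor
    · rintro rfl; exact ⟨rfl, by simp⟩
    · rintro ⟨hl, _⟩; exact List.length_eq_zero_iff.mp hl
  | succ n ih =>
    simp only [statesL, List.mem_append, List.mem_map]
    constructor
    · rintro (⟨s, hs, rfl⟩ | ⟨s, hs, rfl⟩) <;>
      · obtain ⟨hl, hb⟩ := ih.mp hs
        refine ⟨by simp [hl], ?_⟩
        intro y hy
        rcases List.mem_cons.mp hy with rfl | hy
        · simp
        · exact hb y hy
    · rintro ⟨hl, hb⟩
      cases p with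
      | nil => simp at hl
      | cons x t =>
        have ht : t ∈ statesL n :=
          ih.mpr ⟨by simpa using hl, fun y hy => hb y (List.mem_cons_of_mem _ hy)⟩
        rcases hb x List.mem_cons_self with rfl | rfl
        · exact Or.inl ⟨t, ht, rfl⟩
        · exact Or.inr ⟨t, ht, rfl⟩

theorem perm_statesL_prodBits (n : Nat) : (statesL n).Perm (prodBits n) := by
  induction n with
  | zero => simp [statesL, prodBits]
  | succ n ih =>
    show ((statesL n).map _ ++ (statesL n).map _).Perm (([1,0] : List Int).flatMap _)
    have hfm : (([1,0] : List Int).flatMap (fun x => (prodBits n).map (fun s => x :: s)))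
        = (prodBits n).map (fun s => (1:Int) :: s) ++ (prodBits n).map (fun s => (0:Int) :: s) := by
      simp [List.flatMap]
    rw [hfm]
    exact (List.perm_append_comm).trans ((ih.map _).append (ih.map _))

theorem getD_build (keys : List (List Int)) (f : List Int → Int) (d : PySem.Dict (List Int) Int)
    (k : List Int) :
    (keys.foldl (fun d s => d.insert s (f s)) d).getD k 0
      = if k ∈ keys then f k else d.getD k 0 := by
  induction keys generalizing d with
  | nil => simp
  | cons s rest ih =>
    simp only [List.foldl_cons, ih, List.mem_cons]
    by_cases hk : k ∈ rest
    · simp [hk]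
    · by_cases he : k = s <;> simp [hk, he, PySem.Dict.getD_insert]

theorem bin_getElem {n : Nat} {p : List Int} (hp : Bin n p) (j : Nat) (h : j < p.length) :
    p[j] = 0 ∨ p[j] = 1 := hp.2 _ (List.getElem_mem h)

theorem vxor_comm (p q : List Int) : vxor p q = vxor q p := by
  apply List.ext_getElem?
  intro j
  by_cases h1 : j < p.length
  · by_cases h2 : j < q.length
    · rw [getElem?_vxor _ _ _ h1 h2, getElem?_vxor _ _ _ h2 h1]
      exact congrArg some (by omega)
    · rw [getElem?_vxor_none _ _ _ (by omega), getElem?_vxor_none _ _ _ (by omega)]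
  · rw [getElem?_vxor_none _ _ _ (by omega), getElem?_vxor_none _ _ _ (by omega)]

theorem vxor_right_comm (p q r : List Int) : vxor (vxor p r) q = vxor (vxor p q) r := by
  apply List.ext_getElem?
  intro j
  by_cases h : j < p.length ∧ j < q.length ∧ j < r.length
  · obtain ⟨hp, hq, hr⟩ := h
    have hpr : j < (vxor p r).length := by simp only [length_vxor]; omega
    have hpq : j < (vxor p q).length := by simp only [length_vxor]; omega
    rw [getElem?_vxor _ _ _ hpr hq, getElem?_vxor _ _ _ hpq hr,
      getElem_vxor _ _ _ hp hr hpr, getElem_vxor _ _ _ hp hq hpq]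
    exact congrArg some (by omega)
  · rw [getElem?_vxor_none, getElem?_vxor_none] <;> simp only [length_vxor] <;> omega

theorem vxor_cancel {n : Nat} {w q : List Int} (hw : Bin n w) (hq : Bin n q) :
    vxor w (vxor w q) = q := by
  apply List.ext_getElem?
  intro j
  by_cases hj : j < n
  · have hjw : j < w.length := hw.1 ▸ hj
    have hjq : j < q.length := hq.1 ▸ hj
    have hjv : j < (vxor w q).length := by simp only [length_vxor]; omega
    rw [getElem?_vxor _ _ _ hjw hjv, getElem_vxor _ _ _ hjw hjq hjv,
      List.getElem?_eq_getElem hjq]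
    rcases bin_getElem hw j hjw with h3 | h3 <;> rcases bin_getElem hq j hjq with h4 | h4 <;>
      rw [h3, h4] <;> rfl
  · rw [getElem?_vxor_none _ _ _ (by simp only [length_vxor, hw.1, hq.1]; omega),
      List.getElem?_eq_none (by rw [hq.1]; omega)]

theorem vxor_eq_comm {n : Nat} {w q p : List Int} (hw : Bin n w) (hq : Bin n q) (hp : Bin n p) :
    vxor w q = p ↔ q = vxor p w := by
  constructor
  · rintro rfl
    rw [vxor_comm (vxor w q) w]
    exact (vxor_cancel hw hq).symm
  · rintro rfl
    rw [vxor_comm p w]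
    exact vxor_cancel hw hp

theorem Bin_parv {n : Nat} {tup : List (List Int)} (h : ∀ w ∈ tup, Bin n w) :
    Bin n (parv n tup) := by
  induction tup with
  | nil =>
    refine ⟨by simp [parv], ?_⟩
    intro x hx
    simp only [parv, List.foldr_nil] at hx
    exact Or.inl (List.eq_of_mem_replicate hx)
  | cons w t ih =>
    exact Bin_vxor (h w List.mem_cons_self) (ih fun e he => h e (List.mem_cons_of_mem _ he))

theorem parv_cons (n : Nat) (w : List Int) (t : List (List Int)) :
    parv n (w :: t) = vxor w (parv n t) := rfl

theorem getElem?_parv {n : Nat} {tup : List (List Int)} (h : ∀ w ∈ tup, Bin n w)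
    (j : Nat) (hj : j < n) :
    (parv n tup)[j]? = some (((tup.map (fun w => w.getD j 0)).sum) % 2) := by
  induction tup with
  | nil => simp [parv, hj]
  | cons w t ih =>
    have hw := h w List.mem_cons_self
    have ht : ∀ e ∈ t, Bin n e := fun e he => h e (List.mem_cons_of_mem _ he)
    have hjw : j < w.length := hw.1 ▸ hj
    have hlt : j < (parv n t).length := by rw [(Bin_parv ht).1]; exact hj
    have h2 := ih ht
    rw [List.getElem?_eq_getElem hlt] at h2
    have h2v := Option.some.inj h2
    rw [parv_cons, getElem?_vxor w (parv n t) j hjw hlt, h2v,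
      List.map_cons, List.sum_cons, List.getD_eq_getElem w 0 hjw]
    exact congrArg some (by omega)

theorem parv_eq_zero_iff {n : Nat} {tup : List (List Int)} (h : ∀ w ∈ tup, Bin n w) :
    parv n tup = List.replicate n 0
      ↔ ∀ j < n, ((tup.map (fun w => w.getD j 0)).sum) % 2 = 0 := by
  constructor
  · intro hz j hj
    have hp := getElem?_parv h j hj
    rw [hz, List.getElem?_replicate, if_pos hj] at hp
    have := Option.some.inj hp
    omega
  · intro hz
    apply List.ext_getElem?
    intro j
    by_cases hj : j < n
    · rw [getElem?_parv h j hj, List.getElem?_replicate, if_pos hj]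
      exact congrArg some (hz j hj)
    · rw [List.getElem?_eq_none (by rw [(Bin_parv h).1]; omega),
        List.getElem?_eq_none (by simp; omega)]

theorem count_one_eq_sum (row : List Int) (h : ∀ x ∈ row, x = 0 ∨ x = 1) :
    ((PySem.List.count row 1 : Nat) : Int) = row.sum := by
  induction row with
  | nil => simp [PySem.List.count]
  | cons x t ih =>
    have hx := h x List.mem_cons_self
    have ht := ih fun y hy => h y (List.mem_cons_of_mem _ hy)
    rcases hx with rfl | rfl <;>
      simp [PySem.List.count] at ht ⊢ <;> omega

theorem foldl_min_const (rs : List (List Int)) (n : Nat) (h : ∀ s ∈ rs, s.length = n) :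
    rs.foldl (fun acc s => min acc s.length) n = n := by
  induction rs with
  | nil => rfl
  | cons r t ih =>
    have hr := h r List.mem_cons_self
    simp only [List.foldl_cons, hr, min_self]
    exact ih fun s hs => h s (List.mem_cons_of_mem _ hs)

theorem minLen_cols {tup : List (List Int)} {n : Nat} (h : ∀ w ∈ tup, w.length = n)
    (hne : tup ≠ []) : minLen tup = n := by
  cases tup with
  | nil => exact absurd rfl hne
  | cons r t =>
    show t.foldl (fun acc s => min acc s.length) r.length = n
    rw [h r List.mem_cons_self]
    exact foldl_min_const t n fun s hs => h s (List.mem_cons_of_mem _ hs)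

theorem allEven_iff {n : Nat} {tup : List (List Int)} (h : ∀ w ∈ tup, Bin n w) :
    ((zipT tup).all (fun row => PySem.List.count row 1 % 2 == 0))
      = (parv n tup == List.replicate n 0) := by
  rw [Bool.eq_iff_iff, beq_iff_eq, parv_eq_zero_iff h, List.all_eq_true]
  cases htup : tup with
  | nil => subst htup; simp [zipT, minLen]
  | cons r t =>
    rw [← htup]
    have hne : tup ≠ [] := by subst htup; simp
    have hml : minLen tup = n := minLen_cols (fun w hw => (h w hw).1) hne
    have key : ∀ j, j < n → ((PySem.List.count (tup.map (fun w => w.getD j 0)) 1 % 2 == 0) = true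
        ↔ ((tup.map (fun w => w.getD j 0)).sum) % 2 = 0) := by
      intro j hj
      have h01 : ∀ x ∈ tup.map (fun w => w.getD j 0), x = 0 ∨ x = 1 := by
        intro x hx
        simp only [List.mem_map] at hx
        obtain ⟨w, hw, rfl⟩ := hx
        rw [List.getD_eq_getElem w 0 (by rw [(h w hw).1]; exact hj)]
        exact bin_getElem (h w hw) _ _
      have hsum := count_one_eq_sum _ h01
      rw [Nat.beq_eq_true_eq]
      omega
    constructor
    · intro hall j hj
      exact (key j hj).mp (hall (tup.map (fun w => w.getD j 0))
        (by simp only [zipT, hml, List.mem_map]; exact ⟨j, by simp [List.mem_range, hj]⟩))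
    · intro hz row hrow
      simp only [zipT, hml, List.mem_map, List.mem_range] at hrow
      obtain ⟨j, hj, rfl⟩ := hrow
      exact (key j hj).mpr (hz j hj)

theorem mem_of_mem_prodLists {L : List (List (List Int))} {tup : List (List Int)}
    (h : tup ∈ prodLists L) : ∀ e ∈ tup, ∃ l ∈ L, e ∈ l := by
  induction L generalizing tup with
  | nil =>
    simp only [prodLists, List.mem_singleton] at h
    subst h; simp
  | cons l ls ih =>
    simp only [prodLists, List.mem_flatMap, List.mem_map] at h
    obtain ⟨x, hx, tup', htup', rfl⟩ := h
    intro e he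
    rcases List.mem_cons.mp he with rfl | he
    · exact ⟨l, List.mem_cons_self, hx⟩
    · obtain ⟨l', hl', hel⟩ := ih htup' e he
      exact ⟨l', List.mem_cons_of_mem _ hl', hel⟩

theorem countP_flatMap (l : List (List Int)) (f : List Int → List (List (List Int)))
    (p : List (List Int) → Bool) :
    List.countP p (l.flatMap f) = (l.map (fun a => List.countP p (f a))).sum := by
  induction l with
  | nil => simp
  | cons x t ih => simp [List.flatMap_cons, List.countP_append, ih]

theorem Acnt_nil (n : Nat) (p : List Int) :
    Acnt n [] p = if (List.replicate n 0 : List Int) == p then 1 else 0 := by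
  simp only [Acnt, prodLists, List.countP_cons, List.countP_nil, parv, List.foldr_nil]
  by_cases hp : (List.replicate n 0 : List Int) == p <;> simp [hp]

theorem Acnt_cons {n : Nat} {cc : List (List Int)} {L : List (List (List Int))} {p : List Int}
    (hp : Bin n p) (hcc : ∀ w ∈ cc, Bin n w) (hL : ∀ l ∈ L, ∀ w ∈ l, Bin n w) :
    Acnt n (cc :: L) p = (cc.map (fun w => Acnt n L (vxor p w))).sum := by
  simp only [Acnt, prodLists, countP_flatMap]
  push_cast
  rw [List.map_map]
  apply congrArg List.sum
  apply List.map_congr_left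
  intro w hw
  simp only [Function.comp, List.countP_map]
  apply congrArg
  apply List.countP_congr
  intro tup htup
  have htb : ∀ e ∈ tup, Bin n e := by
    intro e he
    obtain ⟨l, hl, hel⟩ := mem_of_mem_prodLists htup e he
    exact hL l hl e hel
  simp only [Function.comp, parv_cons, beq_iff_eq]
  rw [vxor_eq_comm (hcc w hw) (Bin_parv htb) hp]

theorem sum_map_swap (l1 l2 : List (List Int)) (f : List Int → List Int → Int) :
    (l1.map (fun d => (l2.map (fun w => f d w)).sum)).sum
      = (l2.map (fun w => (l1.map (fun d => f d w)).sum)).sum := by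
  induction l1 with
  | nil => simp
  | cons d t ih =>
    simp only [List.map_cons, List.sum_cons, ih, ← PySem.List.sum_map_add_int]

theorem Acnt_snoc {n : Nat} {L : List (List (List Int))} {cc : List (List Int)} {p : List Int}
    (hp : Bin n p) (hcc : ∀ w ∈ cc, Bin n w) (hL : ∀ l ∈ L, ∀ w ∈ l, Bin n w) :
    Acnt n (L ++ [cc]) p = (cc.map (fun w => Acnt n L (vxor p w))).sum := by
  induction L generalizing p with
  | nil => simpa using Acnt_cons hp hcc (by simp)
  | cons x ls ih =>
    have hx : ∀ w ∈ x, Bin n w := hL x List.mem_cons_self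
    have hls : ∀ l ∈ ls, ∀ w ∈ l, Bin n w := fun l hl => hL l (List.mem_cons_of_mem _ hl)
    have hls' : ∀ l ∈ ls ++ [cc], ∀ w ∈ l, Bin n w := by
      intro l hl
      rcases List.mem_append.mp hl with hl | hl
      · exact hls l hl
      · rcases List.mem_singleton.mp hl with rfl; exact hcc
    rw [List.cons_append, Acnt_cons hp hx hls']
    have step : ∀ d ∈ x, Acnt n (ls ++ [cc]) (vxor p d)
        = (cc.map (fun w => Acnt n ls (vxor (vxor p w) d))).sum := by
      intro d hd
      rw [ih (Bin_vxor hp (hx d hd)) hls]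
      apply congrArg List.sum
      apply List.map_congr_left
      intro w _
      rw [vxor_right_comm]
    rw [List.map_congr_left step, sum_map_swap x cc (fun d w => Acnt n ls (vxor (vxor p w) d))]
    apply congrArg List.sum
    apply List.map_congr_left
    intro w hw
    rw [← Acnt_cons (Bin_vxor hp (hcc w hw)) hx hls]

theorem foldl_mod_count {α : Type} (l : List α) (P : α → Bool) (M : Int) (hM : 0 < M)
    (r : Int) (h0 : 0 ≤ r) (h1 : r < M) :
    l.foldl (fun res x => if P x then PySem.Int.mod (res + 1) M else res) r
      = (r + (l.countP P : Nat)) % M := by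
  induction l generalizing r with
  | nil => simp [Int.emod_eq_of_lt h0 h1]
  | cons x t ih =>
    simp only [List.foldl_cons, List.countP_cons]
    by_cases hP : P x
    · rw [if_pos hP, PySem.Int.mod_eq_emod_of_pos hM,
        ih _ (Int.emod_nonneg _ (ne_of_gt hM)) (Int.emod_lt_of_pos _ hM),
        Int.emod_add_emod]
      simp only [hP, if_pos]
      push_cast
      ring_nf
    · rw [if_neg hP, ih r h0 h1]
      simp [hP]

theorem sum_map_mod (l : List (List Int)) (f : List Int → Int) (M : Int) :
    ((l.map (fun x => f x % M)).sum) % M = ((l.map f).sum) % M := by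
  induction l with
  | nil => simp
  | cons x t ih =>
    simp only [List.map_cons, List.sum_cons]
    rw [Int.add_emod (f x % M), Int.emod_emod_of_dvd _ dvd_rfl, ih, ← Int.add_emod]

-- A's per-column candidate lists, as `solution` builds them
def CCof (a : List (List Int)) : List (List (List Int)) :=
  ((zipT a).map List.sum).map (fun total => (prodBits a.length).filter (fun c => total == c.sum))

theorem mem_prodBits_iff {n : Nat} {p : List Int} : p ∈ prodBits n ↔ Bin n p := by
  rw [← (perm_statesL_prodBits n).mem_iff]
  exact mem_statesL

theorem CCof_bin (a : List (List Int)) :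
    ∀ l ∈ CCof a, ∀ w ∈ l, Bin a.length w := by
  intro l hl w hw
  simp only [CCof, List.mem_map] at hl
  obtain ⟨total, _, rfl⟩ := hl
  exact mem_prodBits_iff.mp (List.mem_of_mem_filter hw)

theorem sum_over_cc (n : Nat) (t : Int) (g : List Int → Int) :
    (((statesL n).filter (fun c => c.sum == t)).map g).sum
      = (((prodBits n).filter (fun c => t == c.sum)).map g).sum := by
  have hperm := (perm_statesL_prodBits n).filter (fun c => c.sum == t)
  rw [(hperm.map g).sum_eq]
  have hf : (prodBits n).filter (fun c => c.sum == t)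
      = (prodBits n).filter (fun c => t == c.sum) :=
    List.filter_congr (fun w _ => Bool.beq_comm)
  rw [hf]

theorem step_getD (n : Nat) (t : Int) (dp : PySem.Dict (List Int) Int) (F : List Int → Int)
    (hdp : ∀ s, dp.getD s 0 = if s ∈ statesL n then F s else 0) (s : List Int) :
    ((statesL n).foldl
        (fun d s => d.insert s (PySem.Int.mod
          ((((statesL n).filter (fun c => c.sum == t)).map
              (fun c => dp.getD (vxor s c) 0)).sum) (10 ^ 7 + 19)))
        PySem.Dict.empty).getD s 0
      = if s ∈ statesL n
          then ((((statesL n).filter (fun c => c.sum == t)).map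
              (fun c => F (vxor s c))).sum) % (10 ^ 7 + 19) else 0 := by
  rw [getD_build]
  by_cases hs : s ∈ statesL n
  · rw [if_pos hs, if_pos hs, PySem.Int.mod_eq_emod_of_pos (by norm_num)]
    have hmap : ∀ c ∈ (statesL n).filter (fun c => c.sum == t),
        dp.getD (vxor s c) 0 = F (vxor s c) := by
      intro c hc
      rw [hdp, if_pos (mem_statesL.mpr
        (Bin_vxor (mem_statesL.mp hs) (mem_statesL.mp (List.mem_of_mem_filter hc))))]
    rw [List.map_congr_left hmap]
  · rw [if_neg hs, if_neg hs]; rfl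

theorem groups_getD (n : Nat) (t : Int) :
    (((statesL n).foldl (fun d c => d.modify c.sum [] (fun l => l ++ [c]))
        (PySem.Dict.empty (κ := Int) (ν := List (List Int)))).get? t |>.getD [])
      = (statesL n).filter (fun c => c.sum == t) := by
  rw [← PySem.Dict.getD_eq_get?_getD]
  rw [show ((statesL n).foldl (fun d c => d.modify c.sum [] (fun l => l ++ [c]))
        (PySem.Dict.empty (κ := Int) (ν := List (List Int))))
      = (((statesL n).map (fun c => (c.sum, c))).foldl
          (fun d p => d.modify p.1 [] (fun l => l ++ [p.2]))
          (PySem.Dict.empty (κ := Int) (ν := List (List Int)))) from by rw [List.foldl_map]]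
  rw [PySem.Dict.getD_foldl_modify_append]
  rw [List.filter_map, List.map_map]
  simp [Function.comp_def]

theorem prodLists_of_mem_nil {CC : List (List (List Int))} (h : ([] : List (List Int)) ∈ CC) :
    prodLists CC = [] := by
  induction CC with
  | nil => simp at h
  | cons l ls ih =>
    rcases List.mem_cons.mp h with rfl | h
    · simp [prodLists]
    · simp [prodLists, ih h]

theorem filterA_eq_nil_of {n : Nat} {t : Int}
    (h : (statesL n).filter (fun c => c.sum == t) = []) :
    (prodBits n).filter (fun c => t == c.sum) = [] := by
  have hperm := (perm_statesL_prodBits n).filter (fun c => c.sum == t)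
  rw [h] at hperm
  have h2 := hperm.symm.eq_nil
  rw [show (prodBits n).filter (fun c => c.sum == t)
      = (prodBits n).filter (fun c => t == c.sum) from
    List.filter_congr (fun w _ => Bool.beq_comm)] at h2
  exact h2

theorem dp0_getD (n : Nat) (s : List Int) :
    ((statesL n).foldl
        (fun d s => d.insert s (if s == List.replicate n 0 then (1 : Int) else 0))
        (PySem.Dict.empty (κ := List Int) (ν := Int))).getD s 0
      = if s ∈ statesL n then Acnt n [] s % (10 ^ 7 + 19) else 0 := by
  rw [getD_build]
  by_cases hs : s ∈ statesL n
  · rw [if_pos hs, if_pos hs, Acnt_nil]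
    have hcm : ((s == List.replicate n 0) : Bool)
        = ((List.replicate n 0 : List Int) == s) := Bool.beq_comm
    rw [hcm]
    by_cases hz : ((List.replicate n 0 : List Int) == s)
    · rw [if_pos hz]; norm_num
    · rw [if_neg hz]; norm_num
  · rw [if_neg hs, if_neg hs]; rfl

theorem altLoop_inv (n : Nat) (groups : PySem.Dict Int (List (List Int)))
    (hg : ∀ t, (groups.get? t |>.getD []) = (statesL n).filter (fun c => c.sum == t))
    (ts : List Int) (P : List (List (List Int))) (dp : PySem.Dict (List Int) Int)
    (hP : ∀ l ∈ P, ∀ w ∈ l, Bin n w)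
    (hdp : ∀ s, dp.getD s 0 = if s ∈ statesL n then Acnt n P s % (10 ^ 7 + 19) else 0) :
    altLoop (statesL n) groups ts dp (List.replicate n 0)
      = Acnt n (P ++ ts.map (fun t => (prodBits n).filter (fun c => t == c.sum)))
          (List.replicate n 0) % (10 ^ 7 + 19) := by
  have hz : (List.replicate n 0 : List Int) ∈ statesL n :=
    mem_statesL.mpr ⟨List.length_replicate, fun x hx => Or.inl (List.eq_of_mem_replicate hx)⟩
  induction ts generalizing P dp with
  | nil =>
    simp only [altLoop, List.map_nil, List.append_nil]
    rw [hdp, if_pos hz]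
  | cons t rest ih =>
    simp only [altLoop, hg t]
    by_cases hcc : ((statesL n).filter (fun c => c.sum == t)).isEmpty
    · rw [if_pos hcc]
      have hnil : (prodBits n).filter (fun c => t == c.sum) = [] :=
        filterA_eq_nil_of (List.isEmpty_iff.mp hcc)
      have hmem : ([] : List (List Int)) ∈ P ++ (t :: rest).map
          (fun t => (prodBits n).filter (fun c => t == c.sum)) := by
        rw [List.map_cons, hnil]
        exact List.mem_append.mpr (Or.inr List.mem_cons_self)
      rw [Acnt, prodLists_of_mem_nil hmem]
      rfl
    · rw [if_neg hcc]
      have hccA : ∀ w ∈ (prodBits n).filter (fun c => t == c.sum), Bin n w :=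
        fun w hw => mem_prodBits_iff.mp (List.mem_of_mem_filter hw)
      have hP' : ∀ l ∈ P ++ [(prodBits n).filter (fun c => t == c.sum)], ∀ w ∈ l, Bin n w := by
        intro l hl
        rcases List.mem_append.mp hl with hl | hl
        · exact hP l hl
        · rcases List.mem_singleton.mp hl with rfl; exact hccA
      rw [ih (P ++ [(prodBits n).filter (fun c => t == c.sum)]) _ hP' ?_]
      · rw [List.append_assoc, List.singleton_append, List.map_cons]
      · intro s
        rw [step_getD n t dp (fun s => Acnt n P s % (10 ^ 7 + 19)) hdp s]
        by_cases hs : s ∈ statesL n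
        · rw [if_pos hs, if_pos hs]
          have hsb : Bin n s := mem_statesL.mp hs
          rw [sum_map_mod ((statesL n).filter (fun c => c.sum == t))
              (fun c => Acnt n P (vxor s c)) (10 ^ 7 + 19)]
          rw [sum_over_cc n t (fun c => Acnt n P (vxor s c))]
          rw [← Acnt_snoc hsb hccA hP]
        · rw [if_neg hs, if_neg hs]

theorem solution_eq_Acnt (a : List (List Int)) :
    solution a = Acnt a.length (CCof a) (List.replicate a.length 0) % (10 ^ 7 + 19) := by
  show ((prodLists (CCof a)).map (fun x => zipT x)).foldl
      (fun result array =>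
        if array.all (fun row => PySem.List.count row 1 % 2 == 0) then
          PySem.Int.mod (result + 1) (10 ^ 7 + 19)
        else result) 0 = _
  rw [foldl_mod_count _ _ (10 ^ 7 + 19) (by norm_num) 0 le_rfl (by norm_num)]
  rw [List.countP_map]
  simp only [Function.comp_def]
  have hcongr : ∀ tup ∈ prodLists (CCof a),
      ((zipT tup).all (fun row => PySem.List.count row 1 % 2 == 0))
        = (parv a.length tup == List.replicate a.length 0) := by
    intro tup htup
    have hb : ∀ w ∈ tup, Bin a.length w := by
      intro w hw
      obtain ⟨l, hl, hwl⟩ := mem_of_mem_prodLists htup w hw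
      exact CCof_bin a l hl w hwl
    exact allEven_iff hb
  rw [List.countP_congr
    (q := fun tup => parv a.length tup == List.replicate a.length 0)
    (fun tup htup => by rw [hcongr tup htup])]
  rw [Acnt, zero_add]

theorem solution_alt_eq (a : List (List Int)) :
    solution_alt a = Acnt a.length (CCof a) (List.replicate a.length 0) % (10 ^ 7 + 19) := by
  show altLoop (statesL a.length) _
      ((List.range (minLen a)).map (fun j => (a.map (fun r => r.getD j 0)).sum)) _ _ = _
  rw [altLoop_inv a.length _ (groups_getD a.length) _ [] _ (by simp) (dp0_getD a.length)]
  rw [List.nil_append, List.map_map]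
  rw [show CCof a = ((List.range (minLen a)).map (fun j => (a.map (fun r => r.getD j 0)).sum)).map
      (fun total => (prodBits a.length).filter (fun c => total == c.sum)) from by
    simp [CCof, zipT, List.map_map]]
  rw [List.map_map]

-- ===== VERDICT (by name: the statement is the Claim_ definition above) =====
theorem solution_spec : Claim_equal_solution := by
  intro a _ _
  unfold Spec_solution
  rw [solution_eq_Acnt, solution_alt_eq]
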